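-- pv_equiv track=rewrite | github.com/eun-woo/data_parsing | xml_parsing.py | combine_syllables
-- ===== SOURCE A (Python) =====
-- def combine_syllables(syllables):
--     txt = ""
--     i = 0
--     while i < len(syllables):
--         combined=[]
--         for j in range(i, len(syllables)):
--
--             if len(syllables[j])==1:
--                 combined.append(syllables[j])
--             else:
--
--                 break
--
--         if(len(combined) == 0):
--             txt = txt + syllables[i] + " "
--             i+=1
--         else:
--             txt = txt + ''.join(combined) + " "
--             i+=len(combined)
--     return txt
-- ===== SOURCE B (Python) =====
-- def combine_syllables(syllables):
--     tokens = []
--     current = []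
--     for s in syllables:
--         if len(s) == 1:
--             current.append(s)
--         else:
--             if current:
--                 tokens.append(''.join(current))
--                 current = []
--             tokens.append(s)
--     if current:
--         tokens.append(''.join(current))
--     return ' '.join(tokens) + ' ' if tokens else ''
-- ===== Notes on version B (the rewrite author's own statement) =====
-- stated objective: faster
-- what changed: Replaced A's index-jumping while loop, which re-scans each run with an inner for loop and grows txt by repeated string concatenation, with a single forward pass keeping a 'current' run accumulator and a token list that is joined once at the end.
import Mathlib
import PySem

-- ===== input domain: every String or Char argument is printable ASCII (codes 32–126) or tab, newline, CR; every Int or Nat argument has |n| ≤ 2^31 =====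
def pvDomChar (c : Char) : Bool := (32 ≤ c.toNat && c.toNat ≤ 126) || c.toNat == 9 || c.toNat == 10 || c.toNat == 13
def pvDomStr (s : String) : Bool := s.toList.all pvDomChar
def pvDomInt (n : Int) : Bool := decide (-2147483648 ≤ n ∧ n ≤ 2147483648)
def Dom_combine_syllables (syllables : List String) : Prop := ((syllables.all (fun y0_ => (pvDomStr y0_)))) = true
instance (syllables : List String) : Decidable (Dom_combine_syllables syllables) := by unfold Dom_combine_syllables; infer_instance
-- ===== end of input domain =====

-- B replaces A's index-jumping while loop (inner re-scan of each run) with one forward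
-- accumulator pass collecting runs of single-char syllables, joined once at the end (objective: simpler).

-- ===== PORT A =====
-- inner 'for j in range(i, len(syllables)) … break' loop of A
def combine_syllables_inner (syllables : List String) (j : Nat) (combined : List String) : List String :=
  if h : j < syllables.length then
    if PySem.Str.len syllables[j] == 1 then
      combine_syllables_inner syllables (j + 1) (combined ++ [syllables[j]])
    else combined
  else combined
termination_by syllables.length - j

-- outer 'while i < len(syllables)' loop of A
def combine_syllables_loop (syllables : List String) (i : Nat) (txt : String) : String :=
  if h : i < syllables.length then
    let combined := combine_syllables_inner syllables i []
    if hc : combined.length = 0 then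
      combine_syllables_loop syllables (i + 1) (txt ++ syllables[i] ++ " ")
    else
      combine_syllables_loop syllables (i + combined.length) (txt ++ PySem.Str.join "" combined ++ " ")
  else txt
termination_by syllables.length - i
decreasing_by
  · omega
  · have hne : (combine_syllables_inner syllables i []).length ≠ 0 := hc
    omega

def combine_syllables (syllables : List String) : String :=
  combine_syllables_loop syllables 0 ""

-- ===== PORT B =====
-- loop body of B: state is (tokens, current)
def combine_syllables_alt_step (st : List String × List String) (s : String) : List String × List String :=
  if PySem.Str.len s == 1 then
    (st.1, st.2 ++ [s])
  else
    let tokens := if st.2.isEmpty then st.1 else st.1 ++ [PySem.Str.join "" st.2]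
    (tokens ++ [s], [])

def combine_syllables_alt (syllables : List String) : String :=
  let st := syllables.foldl combine_syllables_alt_step ([], [])
  let tokens := if st.2.isEmpty then st.1 else st.1 ++ [PySem.Str.join "" st.2]
  if tokens.isEmpty then "" else PySem.Str.join " " tokens ++ " "

-- ===== PRECONDITION & SPEC =====
def Spec_combine_syllables (syllables : List String) (out : String) : Prop := out = combine_syllables_alt syllables
instance (syllables : List String) (out : String) : Decidable (Spec_combine_syllables syllables out) := by unfold Spec_combine_syllables; infer_instance

-- ===== CLAIM (what is proved, stated in full; the proofs are below) =====
def Claim_equal_combine_syllables : Prop := ∀ (syllables : List String), Dom_combine_syllables syllables → Spec_combine_syllables syllables (combine_syllables syllables)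

-- ===== LEMMAS AND PROOFS =====

-- a syllable counted as single-char by both programs
def pTok (s : String) : Bool := PySem.Str.len s == 1

-- canonical token list: maximal runs of single-char syllables joined, other syllables kept
def tokensOf : List String → List String
  | [] => []
  | x :: xs =>
    if pTok x then
      PySem.Str.join "" (x :: xs.takeWhile pTok) :: tokensOf (xs.dropWhile pTok)
    else x :: tokensOf xs
termination_by l => l.length
decreasing_by
  · have := List.length_dropWhile_le pTok xs
    simp; omega
  · simp

-- canonical rendering: each token followed by one space
def render : List String → String
  | [] => ""
  | t :: ts => t ++ " " ++ render ts

-- B's pending-run semantics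
def mergeTok : List String → List String → List String
  | cur, [] => if cur.isEmpty then [] else [PySem.Str.join "" cur]
  | cur, x :: xs =>
    if pTok x then mergeTok (cur ++ [x]) xs
    else (if cur.isEmpty then [] else [PySem.Str.join "" cur]) ++ x :: mergeTok [] xs

def finalizeTok (st : List String × List String) : List String :=
  if st.2.isEmpty then st.1 else st.1 ++ [PySem.Str.join "" st.2]

lemma inner_eq (syllables : List String) (j : Nat) (acc : List String) :
    combine_syllables_inner syllables j acc = acc ++ (syllables.drop j).takeWhile pTok := by
  fun_induction combine_syllables_inner syllables j acc with
  | case1 j acc h hp ih =>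
    rw [ih, List.drop_eq_getElem_cons h, List.takeWhile_cons_of_pos (by simpa [pTok] using hp)]
    simp
  | case2 j acc h hp =>
    rw [List.drop_eq_getElem_cons h, List.takeWhile_cons_of_neg (by simpa [pTok] using hp)]
    simp
  | case3 j acc h =>
    rw [List.drop_eq_nil_of_le (by omega)]
    simp

lemma loop_eq (syllables : List String) (i : Nat) (txt : String) :
    combine_syllables_loop syllables i txt = txt ++ render (tokensOf (syllables.drop i)) := by
  fun_induction combine_syllables_loop syllables i txt with
  | case1 i txt h combined hc ih =>
    have hinner : combined = (syllables.drop i).takeWhile pTok := by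
      simpa using inner_eq syllables i []
    have hd : syllables.drop i = syllables[i] :: syllables.drop (i + 1) :=
      List.drop_eq_getElem_cons h
    have hp : pTok syllables[i] = false := by
      by_contra hcon
      have hcon' : pTok syllables[i] = true := by simpa using hcon
      rw [hinner, hd, List.takeWhile_cons_of_pos hcon'] at hc
      simp at hc
    rw [ih, hd, tokensOf, if_neg (by simp [hp])]
    simp only [render, String.append_assoc]
  | case2 i txt h combined hc ih =>
    have hinner : combined = (syllables.drop i).takeWhile pTok := by
      simpa using inner_eq syllables i []
    have hd : syllables.drop i = syllables[i] :: syllables.drop (i + 1) :=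
      List.drop_eq_getElem_cons h
    have hp : pTok syllables[i] = true := by
      by_contra hcon
      have hcon' : pTok syllables[i] = false := by simpa using hcon
      rw [hinner, hd, List.takeWhile_cons_of_neg (by simp [hcon'])] at hc
      simp at hc
    have hdrop : syllables.drop (i + combined.length) = (syllables.drop i).dropWhile pTok := by
      rw [hinner]
      rw [show syllables.drop (i + ((syllables.drop i).takeWhile pTok).length)
            = ((syllables.drop i).takeWhile pTok ++ (syllables.drop i).dropWhile pTok).drop
                ((syllables.drop i).takeWhile pTok).length by
          rw [List.takeWhile_append_dropWhile, List.drop_drop]]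
      exact List.drop_left
    rw [ih, hdrop, hd, tokensOf, if_pos hp]
    rw [hinner, hd, List.takeWhile_cons_of_pos hp, List.dropWhile_cons_of_pos hp]
    simp only [render, String.append_assoc]
  | case3 i txt h =>
    rw [List.drop_eq_nil_of_le (by omega)]
    simp [tokensOf, render]

lemma mergeTok_spec (l : List String) :
    (∀ cur, cur ≠ [] → mergeTok cur l
        = PySem.Str.join "" (cur ++ l.takeWhile pTok) :: tokensOf (l.dropWhile pTok))
    ∧ mergeTok [] l = tokensOf l := by
  induction l with
  | nil =>
    refine ⟨?_, ?_⟩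
    · intro cur hcur
      simp [mergeTok, tokensOf, List.isEmpty_iff, hcur]
    · simp [mergeTok, tokensOf]
  | cons x xs ih =>
    by_cases hx : pTok x = true
    · refine ⟨?_, ?_⟩
      · intro cur hcur
        rw [mergeTok, if_pos hx, ih.1 (cur ++ [x]) (by simp),
          List.takeWhile_cons_of_pos hx, List.dropWhile_cons_of_pos hx]
        simp
      · rw [mergeTok, if_pos hx]
        have h1 := ih.1 ([] ++ [x]) (by simp)
        rw [h1, tokensOf, if_pos hx]
        simp
    · have hx' : pTok x = false := by simpa using hx
      refine ⟨?_, ?_⟩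
      · intro cur hcur
        rw [mergeTok, if_neg (by simp [hx']), List.takeWhile_cons_of_neg (by simp [hx'])]
        simp [List.isEmpty_iff, hcur, ih.2, tokensOf, hx']
      · rw [mergeTok, if_neg (by simp [hx'])]
        simp [ih.2, tokensOf, hx']

lemma foldl_step_eq (l : List String) (toks cur : List String) :
    finalizeTok (l.foldl combine_syllables_alt_step (toks, cur)) = toks ++ mergeTok cur l := by
  induction l generalizing toks cur with
  | nil =>
    by_cases hc : cur.isEmpty <;> simp [finalizeTok, mergeTok, hc]
  | cons x xs ih =>
    by_cases hx : pTok x = true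
    · have hx1 : (PySem.Str.len x == 1) = true := by simpa [pTok] using hx
      have hstep : combine_syllables_alt_step (toks, cur) x = (toks, cur ++ [x]) := by
        unfold combine_syllables_alt_step
        rw [if_pos hx1]
      rw [List.foldl_cons, hstep, ih, mergeTok, if_pos hx]
    · have hx1 : ¬ (PySem.Str.len x == 1) = true := by simpa [pTok] using hx
      have hstep : combine_syllables_alt_step (toks, cur) x
          = ((if cur.isEmpty then toks else toks ++ [PySem.Str.join "" cur]) ++ [x], []) := by
        unfold combine_syllables_alt_step
        rw [if_neg hx1]
      rw [List.foldl_cons, hstep, ih, mergeTok, if_neg hx]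
      by_cases hc : cur.isEmpty <;> simp [hc]

lemma str_join_space_render (ts : List String) (h : ts ≠ []) :
    PySem.Str.join " " ts ++ " " = render ts := by
  induction ts with
  | nil => exact absurd rfl h
  | cons t us ih =>
    cases us with
    | nil =>
      apply String.toList_inj.mp
      simp [PySem.Str.toList_join, PySem.Chars.join_singleton, render]
    | cons u vs =>
      have hj : PySem.Str.join " " (t :: u :: vs) = t ++ " " ++ PySem.Str.join " " (u :: vs) := by
        apply String.toList_inj.mp
        simp [PySem.Str.toList_join, PySem.Chars.join_cons_cons]
      rw [hj, render, String.append_assoc, String.append_assoc, ← ih (by simp)]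
      simp [String.append_assoc]

-- ===== VERDICT (by name: the statement is the Claim_ definition above) =====
theorem combine_syllables_spec : Claim_equal_combine_syllables := by
  intro syllables _
  unfold Spec_combine_syllables combine_syllables combine_syllables_alt
  rw [loop_eq]
  simp only [List.drop_zero, String.empty_append]
  have htok : (let st := syllables.foldl combine_syllables_alt_step ([], [])
      if st.2.isEmpty then st.1 else st.1 ++ [PySem.Str.join "" st.2]) = tokensOf syllables := by
    have := foldl_step_eq syllables [] []
    simpa [finalizeTok, (mergeTok_spec syllables).2] using this
  rw [htok]
  by_cases hn : tokensOf syllables = []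
  · simp [hn, render]
  · rw [if_neg (by simp [hn]), str_join_space_render _ hn]
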